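-- pv_equiv track=rewrite | github.com/RajK01/eQuest-Utilities | ScheduleGenerator/src/schedule.py | replace_consecutive_duplicates
-- ===== SOURCE A (Python) =====
-- def replace_consecutive_duplicates(values):
--     result = []
--     previous_value = None
--     for value in values:
--         if value == previous_value:
--             result.append('&D')
--         else:
--             result.append(value)
--         previous_value = value
--     return result
-- ===== SOURCE B (Python) =====
-- def replace_consecutive_duplicates(values):
--     # Run-based scan: emit the head of each maximal run of equal values,
--     # then one '&D' marker per remaining member of the run.
--     out = []
--     i = 0
--     n = len(values)
--     while i < n:
--         j = i + 1
--         while j < n and values[j] == values[i]: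
--             j += 1
--         out.append(values[i])
--         out.extend(['&D'] * (j - i - 1))
--         i = j
--     return out
-- ===== Notes on version B (the rewrite author's own statement) =====
-- stated objective: alternative
-- what changed: B scans the list run by run (inner loop finds each maximal run of equal adjacent values, then emits the head once and a block of '&D' markers), instead of A's element-by-element loop carrying a previous_value variable.
import Mathlib
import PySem

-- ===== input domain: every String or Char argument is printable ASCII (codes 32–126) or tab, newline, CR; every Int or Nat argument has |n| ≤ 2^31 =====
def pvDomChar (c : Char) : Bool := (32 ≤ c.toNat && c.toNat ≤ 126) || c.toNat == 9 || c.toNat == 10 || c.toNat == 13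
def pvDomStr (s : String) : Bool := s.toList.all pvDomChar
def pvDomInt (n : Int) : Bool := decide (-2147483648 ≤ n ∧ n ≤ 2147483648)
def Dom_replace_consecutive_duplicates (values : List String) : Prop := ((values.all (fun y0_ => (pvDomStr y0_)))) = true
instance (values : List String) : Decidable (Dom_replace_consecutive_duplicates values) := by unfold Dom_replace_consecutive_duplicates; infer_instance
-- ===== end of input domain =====

-- B scans the list run by run instead of A's element-wise loop with a previous_value variable; same cost, different decomposition.
-- ===== PORT A =====
-- A: for value in values: append '&D' if value == previous_value else value; previous_value = value
def replace_consecutive_duplicates (values : List String) : List String :=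
  (values.foldl
    (fun (st : List String × Option String) value =>
      (st.1 ++ [if some value == st.2 then "&D" else value], some value))
    ([], none)).1

-- ===== PORT B =====
-- B: outer while loop over runs; the inner while loop scanning a run of values
-- equal to the head is takeWhile/dropWhile; emits head then (run length - 1) markers.
def replace_consecutive_duplicates_alt (values : List String) : List String :=
  match values with
  | [] => []
  | v :: rest =>
    v :: (List.replicate (rest.takeWhile (· == v)).length "&D"
          ++ replace_consecutive_duplicates_alt (rest.dropWhile (· == v)))
  termination_by values.length
  decreasing_by
    simp only [List.length_cons]
    exact Nat.lt_succ_of_le (List.length_dropWhile_le _ _)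

-- ===== PRECONDITION & SPEC =====
def Spec_replace_consecutive_duplicates (values : List String) (out : List String) : Prop := out = replace_consecutive_duplicates_alt values
instance (values : List String) (out : List String) : Decidable (Spec_replace_consecutive_duplicates values out) := by unfold Spec_replace_consecutive_duplicates; infer_instance

-- ===== CLAIM (what is proved, stated in full; the proofs are below) =====
def Claim_equal_replace_consecutive_duplicates : Prop := ∀ (values : List String), Dom_replace_consecutive_duplicates values → Spec_replace_consecutive_duplicates values (replace_consecutive_duplicates values)

-- ===== LEMMAS AND PROOFS =====

theorem pvAlt_cons (v : String) (rest : List String) :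
    replace_consecutive_duplicates_alt (v :: rest)
      = v :: (List.replicate (rest.takeWhile (· == v)).length "&D"
              ++ replace_consecutive_duplicates_alt (rest.dropWhile (· == v))) := by
  rw [replace_consecutive_duplicates_alt.eq_def]

-- A's loop as a structural recursion carrying previous_value.
def pvALoop (prev : Option String) : List String → List String
  | [] => []
  | v :: vs => (if some v == prev then "&D" else v) :: pvALoop (some v) vs

theorem pvFoldl_eq (l : List String) : ∀ (acc : List String) (prev : Option String),
    (l.foldl
      (fun (st : List String × Option String) value =>
        (st.1 ++ [if some value == st.2 then "&D" else value], some value))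
      (acc, prev)).1 = acc ++ pvALoop prev l := by
  induction l with
  | nil => intro acc prev; simp [pvALoop]
  | cons v vs ih =>
    intro acc prev
    simp only [List.foldl_cons, pvALoop, ih]
    simp

theorem pvRun_eq (l : List String) (v : String) :
    pvALoop (some v) l
      = List.replicate (l.takeWhile (· == v)).length "&D"
        ++ replace_consecutive_duplicates_alt (l.dropWhile (· == v)) := by
  induction l generalizing v with
  | nil => simp [pvALoop, replace_consecutive_duplicates_alt]
  | cons x xs ih =>
    by_cases h : x = v
    · subst h
      simp only [pvALoop, List.takeWhile_cons, List.dropWhile_cons, beq_self_eq_true,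
        if_pos]
      simp [ih x, List.replicate_succ]
    · have hb : (x == v) = false := beq_eq_false_iff_ne.mpr h
      simp only [pvALoop, List.takeWhile_cons, List.dropWhile_cons, hb]
      simp only [if_neg (by simp : ¬(false = true))]
      rw [pvAlt_cons, ih x]
      simp [h]

-- ===== VERDICT =====
theorem replace_consecutive_duplicates_spec : Claim_equal_replace_consecutive_duplicates := by
  intro values _
  show replace_consecutive_duplicates values = replace_consecutive_duplicates_alt values
  cases values with
  | nil => simp [replace_consecutive_duplicates, replace_consecutive_duplicates_alt]
  | cons v vs =>
    unfold replace_consecutive_duplicates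
    rw [pvFoldl_eq, pvAlt_cons]
    simp [pvALoop, pvRun_eq]
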